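-- pv_equiv track=rewrite | github.com/ham-zhao/safety-dataset | scripts/create_notebooks_phase3.py | _split_source
-- ===== SOURCE A (Python) =====
-- def _split_source(source):
--     lines = source.split("\n")
--     result = []
--     for i, line in enumerate(lines):
--         if i < len(lines) - 1:
--             result.append(line + "\n")
--         else:
--             result.append(line)
--     return result
-- ===== SOURCE B (Python) =====
-- def _split_source(source):
--     result = []
--     buf = []
--     for ch in source:
--         if ch == "\n":
--             buf.append("\n")
--             result.append("".join(buf))
--             buf = []
--         else:
--             buf.append(ch)
--     result.append("".join(buf))
--     return result
-- ===== Notes on version B (the rewrite author's own statement) =====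
-- stated objective: alternative
-- what changed: Replaces split('\n') followed by an enumerate loop that re-attaches '\n' to all but the last piece with a single character scan that accumulates a buffer and emits it (newline included) at each '\n', plus the final tail.
import Mathlib
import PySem

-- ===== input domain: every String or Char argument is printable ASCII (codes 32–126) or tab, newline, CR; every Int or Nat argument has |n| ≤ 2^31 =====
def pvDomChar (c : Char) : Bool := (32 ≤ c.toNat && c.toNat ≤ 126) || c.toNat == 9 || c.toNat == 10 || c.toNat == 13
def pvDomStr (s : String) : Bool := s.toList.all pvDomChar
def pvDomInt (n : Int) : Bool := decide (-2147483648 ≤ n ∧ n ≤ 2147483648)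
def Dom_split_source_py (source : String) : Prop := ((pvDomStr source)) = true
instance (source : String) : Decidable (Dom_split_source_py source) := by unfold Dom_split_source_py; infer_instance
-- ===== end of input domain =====

-- B replaces split('\n') + an enumerate loop re-attaching '\n' with a single buffer-accumulating
-- character scan (alternative decomposition, same cost). Strings are handled as char lists
-- (PySem convention); pieces are rebuilt with String.mk, which is exact string concatenation.

-- ===== PORT A =====
-- lines = source.split("\n"); then for i, line in enumerate(lines): append line+"\n" except last
def split_source_py (source : String) : List String :=
  let lines : List (List Char) := PySem.Chars.splitOn source.toList ['\n']
  let result : List (List Char) :=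
    (PySem.List.enumerate lines 0).foldl
      (fun result il =>
        if il.1 < (lines.length : Int) - 1 then result ++ [il.2 ++ ['\n']]
        else result ++ [il.2]) []
  result.map String.mk

-- ===== PORT B =====
-- character scan: accumulate buf; on '\n' emit buf+'\n' and reset; emit the tail at the end
def pvScanB (buf : List Char) : List Char → List (List Char)
  | [] => [buf]
  | c :: rest =>
      if c = '\n' then (buf ++ ['\n']) :: pvScanB [] rest
      else pvScanB (buf ++ [c]) rest

def split_source_py_alt (source : String) : List String :=
  (pvScanB [] source.toList).map String.mk

-- ===== PRECONDITION & SPEC =====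
def Spec_split_source_py (source : String) (out : List String) : Prop := out = split_source_py_alt source
instance (source : String) (out : List String) : Decidable (Spec_split_source_py source out) := by unfold Spec_split_source_py; infer_instance

-- ===== CLAIM (what is proved, stated in full; the proofs are below) =====
def Claim_equal_split_source_py : Prop := ∀ (source : String), Dom_split_source_py source → Spec_split_source_py source (split_source_py source)

-- ===== LEMMAS AND PROOFS =====

-- recursive description of split-on-'\n' (cur is the reversed current piece)
def pvSr (cur : List Char) : List Char → List (List Char)
  | [] => [cur.reverse]
  | c :: rest =>
      if c = '\n' then cur.reverse :: pvSr [] rest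
      else pvSr (c :: cur) rest

-- append '\n' to every piece except the last
def pvNlAll : List (List Char) → List (List Char)
  | [] => []
  | [x] => [x]
  | x :: y :: ys => (x ++ ['\n']) :: pvNlAll (y :: ys)

theorem pvSr_ne_nil (l cur : List Char) : pvSr cur l ≠ [] := by
  induction l generalizing cur with
  | nil => simp [pvSr]
  | cons c rest ih =>
      by_cases h : c = '\n' <;> simp [pvSr, h, ih]

theorem pv_go_eq (fuel : Nat) :
    ∀ (l cur : List Char) (acc : List (List Char)), l.length ≤ fuel →
      PySem.Chars.splitOn.go ['\n'] fuel l cur acc = acc.reverse ++ pvSr cur l := by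
  induction fuel with
  | zero =>
      intro l cur acc h
      have : l = [] := List.eq_nil_of_length_eq_zero (Nat.le_zero.mp h)
      subst this
      simp [PySem.Chars.splitOn.go, pvSr]
  | succ fuel ih =>
      intro l cur acc h
      cases l with
      | nil => simp [PySem.Chars.splitOn.go, pvSr]
      | cons c rest =>
          by_cases hc : c = '\n'
          · subst hc
            rw [show PySem.Chars.splitOn.go ['\n'] (fuel+1) ('\n' :: rest) cur acc
                  = PySem.Chars.splitOn.go ['\n'] fuel rest [] (cur.reverse :: acc) by
                  simp [PySem.Chars.splitOn.go, List.isPrefixOf]]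
            rw [ih rest [] (cur.reverse :: acc) (by simpa using Nat.succ_le_succ_iff.mp h)]
            simp [pvSr]
          · rw [show PySem.Chars.splitOn.go ['\n'] (fuel+1) (c :: rest) cur acc
                  = PySem.Chars.splitOn.go ['\n'] fuel rest (c :: cur) acc by
                  simp [PySem.Chars.splitOn.go, List.isPrefixOf]
                  intro h'; exact absurd h'.symm hc]
            rw [ih rest (c :: cur) acc (by simpa using Nat.succ_le_succ_iff.mp h)]
            simp [pvSr, hc]

theorem pv_splitOn_eq (s : List Char) :
    PySem.Chars.splitOn s ['\n'] = pvSr [] s := by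
  have := pv_go_eq (s.length + 1) s [] [] (Nat.le_succ _)
  simpa [PySem.Chars.splitOn] using this

theorem pv_scanB_eq (l : List Char) :
    ∀ buf : List Char, pvScanB buf l = pvNlAll (pvSr buf.reverse l) := by
  induction l with
  | nil => intro buf; simp [pvScanB, pvSr, pvNlAll]
  | cons c rest ih =>
      intro buf
      by_cases hc : c = '\n'
      · subst hc
        rw [show pvScanB buf ('\n' :: rest) = (buf ++ ['\n']) :: pvScanB [] rest by
              simp [pvScanB]]
        rw [ih []]
        have h1 : pvSr buf.reverse ('\n' :: rest) = buf :: pvSr [] rest := by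
          simp [pvSr]
        rw [h1]
        obtain ⟨y, ys, hy⟩ := List.exists_cons_of_ne_nil (pvSr_ne_nil rest [])
        rw [hy]
        simp [pvNlAll, hy]
      · rw [show pvScanB buf (c :: rest) = pvScanB (buf ++ [c]) rest by
              simp [pvScanB, hc]]
        rw [ih (buf ++ [c])]
        have h1 : pvSr buf.reverse (c :: rest) = pvSr (c :: buf.reverse) rest := by
          simp [pvSr, hc]
        rw [h1]
        simp

theorem pv_foldl_emit (g : Int × List Char → List Char) :
    ∀ (xs : List (Int × List Char)) (acc : List (List Char)),
      xs.foldl (fun r il => r ++ [g il]) acc = acc ++ xs.map g := by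
  intro xs
  induction xs with
  | nil => simp
  | cons x xs ih => intro acc; simp [List.foldl_cons, ih]

theorem pv_enum_map (l : List (List Char)) :
    ∀ (s n : Int), s + l.length = n →
      (PySem.List.enumerate l s).map
          (fun il => if il.1 < n - 1 then il.2 ++ ['\n'] else il.2)
        = pvNlAll l := by
  induction l with
  | nil => intro s n _; simp [PySem.List.enumerate_nil, pvNlAll]
  | cons x xs ih =>
      intro s n hn
      rw [PySem.List.enumerate_cons]
      cases xs with
      | nil =>
          have : ¬ (s < n - 1) := by simp at hn; omega
          simp [this, pvNlAll, PySem.List.enumerate_nil]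
      | cons y ys =>
          have hlt : s < n - 1 := by
            simp [List.length_cons] at hn; push_cast at hn ⊢; omega
          have := ih (s + 1) n (by simp [List.length_cons] at hn ⊢; push_cast at hn ⊢; omega)
          simp only [List.map_cons, if_pos hlt]
          rw [this]
          simp [pvNlAll]

-- ===== VERDICT (by name: the statement is the Claim_ definition above) =====
theorem split_source_py_spec : Claim_equal_split_source_py := by
  intro source _
  unfold Spec_split_source_py split_source_py split_source_py_alt
  rw [pv_scanB_eq source.toList []]
  simp only [List.reverse_nil]
  rw [pv_splitOn_eq]
  have hf : (fun (result : List (List Char)) (il : Int × List Char) =>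
        if il.1 < ((pvSr [] source.toList).length : Int) - 1 then result ++ [il.2 ++ ['\n']]
        else result ++ [il.2])
      = (fun r il => r ++ [if il.1 < ((pvSr [] source.toList).length : Int) - 1
          then il.2 ++ ['\n'] else il.2]) := by
    funext r il; split <;> rfl
  rw [hf, pv_foldl_emit (fun il => if il.1 < ((pvSr [] source.toList).length : Int) - 1
        then il.2 ++ ['\n'] else il.2)]
  rw [pv_enum_map (pvSr [] source.toList) 0 ((pvSr [] source.toList).length : Int) (by ring)]
  simp
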